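-- pv_equiv track=rewrite | github.com/chaiminwoo0223/Programmers | Level/level2/program14.py | lcm
-- ===== SOURCE A (Python) =====
-- def lcm(elements, number):
--     while True:
--         count = 0
--
--         for element in elements:
--             if number % element != 0:
--                 number += 1
--                 break
--             else:
--                 count += 1
--
--         if count == len(elements):
--             return number
-- ===== SOURCE B (Python) =====
-- def lcm(elements, number):
--     # Compute the lcm of the elements with Euclid's algorithm, then round
--     # number up to the next multiple in O(1), instead of counting up one by one.
--     L = 1
--     for e in elements:
--         g = abs(e)
--         r0, r1 = L, g
--         while r1:
--             r0, r1 = r1, r0 % r1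
--         L = L * g // r0
--     return number + (-number) % L
-- ===== Notes on version B (the rewrite author's own statement) =====
-- stated objective: alternative
-- what changed: Instead of incrementing number one by one and rescanning all elements until every one divides it, B computes the lcm of the elements with Euclid's gcd and rounds number up to the next multiple with one modulo.
import Mathlib
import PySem

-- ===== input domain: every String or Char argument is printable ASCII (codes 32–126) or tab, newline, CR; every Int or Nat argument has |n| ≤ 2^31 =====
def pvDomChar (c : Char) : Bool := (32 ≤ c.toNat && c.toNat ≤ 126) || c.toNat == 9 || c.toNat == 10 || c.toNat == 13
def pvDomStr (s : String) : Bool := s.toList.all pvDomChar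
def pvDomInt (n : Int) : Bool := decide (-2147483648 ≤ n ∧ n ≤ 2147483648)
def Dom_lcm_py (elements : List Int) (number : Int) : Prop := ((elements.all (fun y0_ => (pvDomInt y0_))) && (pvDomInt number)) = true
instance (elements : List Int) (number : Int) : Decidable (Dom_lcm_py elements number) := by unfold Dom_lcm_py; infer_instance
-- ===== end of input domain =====

-- B replaces A's one-by-one counting loop by lcm-via-gcd plus one modulo (a different, closed-form rounding-up algorithm).

-- ===== PORT A =====
-- A-side helper: the 'for element in elements' body; returns none where Python raises
-- ZeroDivisionError (number % 0), some (number', count') otherwise: number' = number+1 on break.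
def pvInnerA : List Int → Int → Int → Option (Int × Int)
  | [], n, c => some (n, c)
  | e :: rest, n, c =>
    if e = 0 then none  -- number % 0 raises ZeroDivisionError
    else if PySem.Int.mod n e ≠ 0 then some (n + 1, c) else pvInnerA rest n (c + 1)

-- positive common multiple of the nonzero elements: the termination measure's modulus
def pvLz (es : List Int) : Nat :=
  es.foldr (fun e a => if e = 0 then a else Nat.lcm e.natAbs a) 1

theorem pvLz_pos (es : List Int) : 0 < pvLz es := by
  induction es with
  | nil => simp [pvLz]
  | cons e es ih =>
    simp only [pvLz, List.foldr_cons] at *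
    split
    · exact ih
    · exact Nat.pos_of_ne_zero (fun h => by
        rcases Nat.lcm_eq_zero_iff.mp h with h' | h'
        · exact ‹¬ e = 0› (by omega)
        · omega)

theorem pv_dvd_pvLz {es : List Int} {e : Int} (he : e ∈ es) (hne : e ≠ 0) :
    e.natAbs ∣ pvLz es := by
  induction es with
  | nil => cases he
  | cons x es ih =>
    simp only [pvLz, List.foldr_cons]
    rcases List.mem_cons.mp he with h | h
    · subst h; rw [if_neg hne]; exact Nat.dvd_lcm_left _ _
    · split
      · exact ih h
      · exact dvd_trans (ih h) (Nat.dvd_lcm_right _ _)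

-- break case of the inner loop: some nonzero element fails to divide n
theorem pvInnerA_break {es : List Int} {n c p q : Int}
    (h : pvInnerA es n c = some (p, q)) (hq : q ≠ c + es.length) :
    p = n + 1 ∧ ∃ e ∈ es, e ≠ 0 ∧ ¬ e ∣ n := by
  induction es generalizing c with
  | nil =>
    simp only [pvInnerA, Option.some.injEq, Prod.mk.injEq] at h
    simp only [List.length_nil] at hq
    omega
  | cons e es ih =>
    simp only [pvInnerA] at h
    by_cases hez : e = 0
    · rw [if_pos hez] at h; cases h
    · rw [if_neg hez] at h
      by_cases hr : PySem.Int.mod n e ≠ 0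
      · rw [if_pos hr] at h
        simp only [Option.some.injEq, Prod.mk.injEq] at h
        refine ⟨h.1.symm, e, List.mem_cons_self, hez, ?_⟩
        rw [← PySem.Int.mod_eq_zero_iff_dvd]; exact hr
      · rw [if_neg hr] at h
        have hq' : q ≠ (c + 1) + (es.length : Int) := by
          simp only [List.length_cons] at hq; push_cast at hq ⊢; omega
        have := ih h hq'
        exact ⟨this.1, this.2.elim fun x hx => ⟨x, List.mem_cons_of_mem _ hx.1, hx.2⟩⟩

-- if the break element exists, the common multiple pvLz does not divide n
theorem pv_not_dvd_Lz {es : List Int} {n : Int}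
    (h : ∃ e ∈ es, e ≠ 0 ∧ ¬ e ∣ n) : ¬ ((pvLz es : Int) ∣ n) := by
  rcases h with ⟨e, he, hez, hnd⟩
  intro hL
  apply hnd
  have h1 : (e.natAbs : Int) ∣ n :=
    dvd_trans (Int.natCast_dvd_natCast.mpr (pv_dvd_pvLz he hez)) hL
  exact Int.natAbs_dvd.mp h1

-- stepping n by 1 moves the distance to the next common multiple down by 1
theorem pv_emod_succ {es : List Int} {n : Int}
    (h : ∃ e ∈ es, e ≠ 0 ∧ ¬ e ∣ n) :
    (-(n + 1)) % ((pvLz es : Nat) : Int) = (-n) % ((pvLz es : Nat) : Int) - 1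
      ∧ 1 ≤ (-n) % ((pvLz es : Nat) : Int) := by
  have hL : (0 : Int) < (pvLz es : Int) := by exact_mod_cast pvLz_pos es
  have hnd : ¬ ((pvLz es : Int) ∣ n) := pv_not_dvd_Lz h
  have h0 : (-n) % ((pvLz es : Nat) : Int) ≠ 0 := fun h0 =>
    hnd (Int.dvd_neg.mp (Int.dvd_of_emod_eq_zero h0))
  have hge : 1 ≤ (-n) % ((pvLz es : Nat) : Int) := by
    have := Int.emod_nonneg (-n) (by omega : ((pvLz es : Nat) : Int) ≠ 0)
    omega
  have hlt : (-n) % ((pvLz es : Nat) : Int) < (pvLz es : Int) := Int.emod_lt_of_pos _ hL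
  refine ⟨?_, hge⟩
  rw [show (-(n+1) : Int) = (-n) - 1 by ring, Int.sub_emod]
  have h1 : (1 : Int) % ((pvLz es : Nat) : Int) = 1 :=
    Int.emod_eq_of_lt (by omega) (by omega)
  rw [h1]
  exact Int.emod_eq_of_lt (by omega) (by omega)

-- distance to the next common multiple strictly decreases on each outer round
theorem pv_measure_dec {es : List Int} {n : Int}
    (h : ∃ e ∈ es, e ≠ 0 ∧ ¬ e ∣ n) :
    ((-(n + 1)) % ((pvLz es : Nat) : Int)).toNat < ((-n) % ((pvLz es : Nat) : Int)).toNat := by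
  have := pv_emod_succ h
  omega

-- port of A's 'while True' loop; the measure is the distance to the next common multiple
def pvLoopA (es : List Int) (n : Int) : Int :=
  match h : pvInnerA es n 0 with
  | none => n  -- Python raises ZeroDivisionError here (excluded by Pre_)
  | some (p, q) => if hq : q = es.length then p else pvLoopA es p
termination_by ((-n) % ((pvLz es : Nat) : Int)).toNat
decreasing_by
  have hb := pvInnerA_break h (by simpa using hq)
  rw [hb.1]
  exact pv_measure_dec hb.2

def lcm_py (elements : List Int) (number : Int) : Int :=
  pvLoopA elements number

-- ===== PORT B =====
-- B-side helper: the 'while r1: r0, r1 = r1, r0 % r1' Euclid loop from Source B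
def pvGcdLoop (r0 r1 : Int) : Int :=
  if h : r1 = 0 then r0 else pvGcdLoop r1 (PySem.Int.mod r0 r1)
termination_by r1.natAbs
decreasing_by
  rcases lt_or_gt_of_ne h with hneg | hpos
  · have := PySem.Int.mod_neg_bounds r0 hneg
    omega
  · have h1 := PySem.Int.mod_nonneg r0 hpos
    have h2 := PySem.Int.mod_lt r0 hpos
    omega

def lcm_py_alt (elements : List Int) (number : Int) : Int :=
  let L := elements.foldl (fun L e =>
    let g := |e|
    PySem.Int.floordiv (L * g) (pvGcdLoop L g)) 1
  -- number + (-number) % L ; mod? = none is Python's ZeroDivisionError (excluded by Pre_)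
  number + (PySem.Int.mod? (-number) L).getD 0

-- ===== PRECONDITION & SPEC =====
-- Pre_ excludes exactly the inputs with a zero element, on which both A and B raise ZeroDivisionError.
def Pre_lcm_py (elements : List Int) (number : Int) : Prop := (0 : Int) ∉ elements
instance (elements : List Int) (number : Int) : Decidable (Pre_lcm_py elements number) := by
  unfold Pre_lcm_py; infer_instance

def pvWitness_lcm_py : List Int × Int := ([2, 3], 5)

def Spec_lcm_py (elements : List Int) (number : Int) (out : Int) : Prop := out = lcm_py_alt elements number
instance (elements : List Int) (number : Int) (out : Int) : Decidable (Spec_lcm_py elements number out) := by unfold Spec_lcm_py; infer_instance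

-- ===== CLAIM (what is proved, stated in full; the proofs are below) =====
def Claim_equal_lcm_py : Prop := ∀ (elements : List Int) (number : Int), Dom_lcm_py elements number → Pre_lcm_py elements number → Spec_lcm_py elements number (lcm_py elements number)

-- ===== LEMMAS AND PROOFS =====

-- no-break case of the inner loop: every element is nonzero and divides n
theorem pvInnerA_all {es : List Int} {n : Int} (h : ∀ e ∈ es, e ≠ 0 ∧ e ∣ n) :
    ∀ c, pvInnerA es n c = some (n, c + es.length) := by
  induction es with
  | nil => intro c; simp [pvInnerA]
  | cons e es ih =>
    intro c
    have he := h e List.mem_cons_self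
    have hmod : PySem.Int.mod n e = 0 := (PySem.Int.mod_eq_zero_iff_dvd n e).mpr he.2
    simp only [pvInnerA, if_neg he.1, hmod]
    rw [if_neg (by simp)]
    rw [ih (fun x hx => h x (List.mem_cons_of_mem _ hx)) (c + 1)]
    simp only [Option.some.injEq, Prod.mk.injEq, List.length_cons]
    exact ⟨trivial, by push_cast; ring⟩

-- pvLz divides n iff every (nonzero) element does
theorem pvLz_dvd_iff {es : List Int} (h0 : (0 : Int) ∉ es) (n : Int) :
    ((pvLz es : Int) ∣ n) ↔ ∀ e ∈ es, e ∣ n := by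
  induction es with
  | nil => simp [pvLz]
  | cons e es ih =>
    have hez : e ≠ 0 := fun h => h0 (h ▸ List.mem_cons_self)
    have h0' : (0 : Int) ∉ es := fun h => h0 (List.mem_cons_of_mem _ h)
    simp only [pvLz, List.foldr_cons, if_neg hez]
    rw [show (es.foldr (fun e a => if e = 0 then a else Nat.lcm e.natAbs a) 1) = pvLz es from rfl]
    constructor
    · intro hd
      have h1 : (e.natAbs : Int) ∣ n :=
        dvd_trans (Int.natCast_dvd_natCast.mpr (Nat.dvd_lcm_left _ _)) hd
      have h2 : ((pvLz es : Int)) ∣ n :=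
        dvd_trans (Int.natCast_dvd_natCast.mpr (Nat.dvd_lcm_right _ _)) hd
      intro x hx
      rcases List.mem_cons.mp hx with h | h
      · subst h; exact (Int.natAbs_dvd).mp h1
      · exact (ih h0').mp h2 x h
    · intro hall
      have h1 : e.natAbs ∣ n.natAbs := Int.natAbs_dvd_natAbs.mpr (hall e List.mem_cons_self)
      have h2 : pvLz es ∣ n.natAbs := by
        have h' := (ih h0').mpr (fun x hx => hall x (List.mem_cons_of_mem _ hx))
        simpa using Int.natAbs_dvd_natAbs.mpr h'
      have : Nat.lcm e.natAbs (pvLz es) ∣ n.natAbs := Nat.lcm_dvd h1 h2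
      exact Int.natAbs_dvd_natAbs.mp (by simpa using this)

-- A's loop returns the next multiple of pvLz at or above n
-- the inner loop never hits a zero divisor when 0 is not an element
theorem pvInnerA_ne_none {es : List Int} (h0 : (0 : Int) ∉ es) (n : Int) :
    ∀ c, pvInnerA es n c ≠ none := by
  induction es with
  | nil => intro c h; simp [pvInnerA] at h
  | cons e t iht =>
    intro c h
    have hez : e ≠ 0 := fun hz => h0 (hz ▸ List.mem_cons_self)
    simp only [pvInnerA, if_neg hez] at h
    split at h
    · cases h
    · exact iht (fun hm => h0 (List.mem_cons_of_mem _ hm)) _ h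

-- when some element fails to divide n, the scan cannot finish with count = length
theorem pvInnerA_break_len {es : List Int} {n : Int} (h0 : (0 : Int) ∉ es)
    (hne : ∃ e ∈ es, e ≠ 0 ∧ ¬ e ∣ n) :
    ∀ c p q, pvInnerA es n c = some (p, q) → q ≠ c + es.length := by
  induction es with
  | nil => rcases hne with ⟨e, he, _⟩; cases he
  | cons e t iht =>
    intro c p q hin hq
    have hez : e ≠ 0 := fun hz => h0 (hz ▸ List.mem_cons_self)
    simp only [pvInnerA, if_neg hez] at hin
    split at hin
    · simp only [Option.some.injEq, Prod.mk.injEq] at hin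
      simp only [List.length_cons] at hq
      have hlen : (0 : Int) ≤ (t.length : Int) := by positivity
      push_cast at hq
      omega
    · rename_i hr
      have hdvd : e ∣ n := by
        rw [← PySem.Int.mod_eq_zero_iff_dvd]
        push_neg at hr; exact hr
      have hne' : ∃ x ∈ t, x ≠ 0 ∧ ¬ x ∣ n := by
        rcases hne with ⟨x, hx, hxz, hxd⟩
        rcases List.mem_cons.mp hx with h | h
        · exact absurd (h ▸ hdvd) hxd
        · exact ⟨x, h, hxz, hxd⟩
      have := iht (fun hm => h0 (List.mem_cons_of_mem _ hm)) hne' (c + 1) p q hin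
      simp only [List.length_cons] at hq
      apply this
      push_cast at hq ⊢
      omega

-- A's loop returns the next multiple of pvLz at or above n
theorem pvLoopA_eq {es : List Int} (h0 : (0 : Int) ∉ es) :
    ∀ n, pvLoopA es n = n + (-n) % ((pvLz es : Nat) : Int) := by
  intro n
  induction hm : ((-n) % ((pvLz es : Nat) : Int)).toNat using Nat.strong_induction_on
    generalizing n with
  | _ k ih =>
  subst hm
  by_cases hall : ∀ e ∈ es, e ∣ n
  · have hall' : ∀ e ∈ es, e ≠ 0 ∧ e ∣ n :=
      fun e he => ⟨fun h => h0 (h ▸ he), hall e he⟩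
    have hdvd : ((pvLz es : Int)) ∣ -n := Dvd.dvd.neg_right ((pvLz_dvd_iff h0 n).mpr hall)
    have hinn := pvInnerA_all hall' 0
    rw [pvLoopA]
    split
    · rename_i heq; rw [hinn] at heq; cases heq
    · rename_i p q heq
      rw [hinn] at heq
      simp only [Option.some.injEq, Prod.mk.injEq] at heq
      rw [dif_pos (by omega), ← heq.1, Int.emod_eq_zero_of_dvd hdvd, add_zero]
  · have hne : ∃ e ∈ es, e ≠ 0 ∧ ¬ e ∣ n := by
      rcases not_forall.mp hall with ⟨e, he⟩
      rcases _root_.not_imp.mp he with ⟨hmem, hnd⟩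
      exact ⟨e, hmem, fun h => h0 (h ▸ hmem), hnd⟩
    rw [pvLoopA]
    split
    · rename_i heq; exact absurd heq (pvInnerA_ne_none h0 n 0)
    · rename_i p q heq
      have hq : q ≠ 0 + (es.length : Int) := pvInnerA_break_len h0 hne 0 p q heq
      have hb := pvInnerA_break heq hq
      rw [dif_neg (by omega), hb.1]
      have hdec := pv_measure_dec hb.2
      rw [ih _ hdec (n + 1) rfl]
      have hsucc := pv_emod_succ hb.2
      omega

-- B's Euclid loop computes gcd on natural inputs
theorem pvGcdLoop_eq (b : Nat) : ∀ a : Nat, pvGcdLoop (a : Int) (b : Int) = (Nat.gcd a b : Int) := by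
  induction b using Nat.strong_induction_on with
  | _ b ih =>
  intro a
  rw [pvGcdLoop]
  by_cases hb : b = 0
  · subst hb; simp
  · rw [dif_neg (by exact_mod_cast hb)]
    rw [PySem.Int.mod_natCast]
    rw [ih (a % b) (Nat.mod_lt _ (Nat.pos_of_ne_zero hb))]
    rw [Nat.gcd_comm a b, Nat.gcd_rec b a, Nat.gcd_comm]

-- one step of B's fold is Nat.lcm
theorem pvStepB_eq (m g : Nat) (hm : 0 < m) :
    PySem.Int.floordiv ((m : Int) * (g : Int)) (pvGcdLoop (m : Int) (g : Int)) = (Nat.lcm m g : Int) := by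
  rw [pvGcdLoop_eq]
  rw [show ((m : Int) * (g : Int)) = ((m * g : Nat) : Int) by push_cast; ring]
  rw [PySem.Int.floordiv_natCast]
  rfl

-- B's fold over the elements computes pvLz (times the accumulator)
theorem pvFoldB_eq {es : List Int} (h0 : (0 : Int) ∉ es) :
    ∀ m : Nat, 0 < m →
      es.foldl (fun L e => PySem.Int.floordiv (L * |e|) (pvGcdLoop L |e|)) (m : Int)
        = (Nat.lcm m (pvLz es) : Int) := by
  induction es with
  | nil => intro m hm; simp [pvLz, Nat.lcm_one_right]
  | cons e es ih =>
    intro m hm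
    have hez : e ≠ 0 := fun h => h0 (h ▸ List.mem_cons_self)
    have h0' : (0 : Int) ∉ es := fun h => h0 (List.mem_cons_of_mem _ h)
    simp only [List.foldl_cons]
    have habs : |e| = (e.natAbs : Int) := by
      rw [Int.abs_eq_natAbs]
    rw [habs, pvStepB_eq m e.natAbs hm]
    have hpos : 0 < Nat.lcm m e.natAbs := by
      apply Nat.pos_of_ne_zero
      intro h
      rcases Nat.lcm_eq_zero_iff.mp h with h | h
      · omega
      · exact hez (Int.natAbs_eq_zero.mp h)
    rw [ih h0' _ hpos]
    congr 1
    simp only [pvLz, List.foldr_cons, if_neg hez]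
    rw [show (es.foldr (fun e a => if e = 0 then a else Nat.lcm e.natAbs a) 1) = pvLz es from rfl]
    rw [Nat.lcm_assoc]

-- ===== VERDICT (by name: the statement is the Claim_ definition above) =====
theorem lcm_py_spec : Claim_equal_lcm_py := by
  intro elements number _ hpre
  unfold Spec_lcm_py lcm_py lcm_py_alt
  show pvLoopA elements number
      = number + (PySem.Int.mod? (-number)
          (elements.foldl (fun L e => PySem.Int.floordiv (L * |e|) (pvGcdLoop L |e|)) 1)).getD 0
  have hL := pvFoldB_eq hpre 1 Nat.one_pos
  simp only [Nat.cast_one] at hL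
  rw [hL, Nat.lcm_one_left, pvLoopA_eq hpre number]
  have hpos : (0 : Int) < (pvLz elements : Int) := by exact_mod_cast pvLz_pos elements
  have hne : ((pvLz elements : Nat) : Int) ≠ 0 := by omega
  have hm : PySem.Int.mod? (-number) ((pvLz elements : Nat) : Int)
      = some (PySem.Int.mod (-number) ((pvLz elements : Nat) : Int)) := by
    simp only [PySem.Int.mod?]
    rw [if_neg (by omega)]
    simp [PySem.Int.mod]
  rw [hm, Option.getD_some, PySem.Int.mod_eq_emod_of_pos hpos]
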